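-- pv_equiv track=rewrite | github.com/khuushichand/aiml-project | tldw_Server_API/app/core/Persona/connections.py | host_matches_allowlist
-- ===== SOURCE A (Python) =====
-- def normalize_hostname(host: str) -> str:
--     return str(host or "").strip().rstrip(".").lower()
--
-- def host_matches_allowlist(host: str, allowlist: list[str]) -> bool:
--     normalized_host = normalize_hostname(host)
--     normalized_allowlist = [
--         normalize_hostname(item)
--         for item in allowlist
--         if normalize_hostname(item)
--     ]
--     if not normalized_allowlist:
--         return False
--     for allowed in normalized_allowlist:
--         if normalized_host == allowed or normalized_host.endswith(f".{allowed}"):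
--             return True
--     return False
-- ===== SOURCE B (Python) =====
-- def normalize_hostname(host: str) -> str:
--     return str(host or "").strip().rstrip(".").lower()
--
-- def host_matches_allowlist(host: str, allowlist: list[str]) -> bool:
--     allowed_set = {n for n in (normalize_hostname(item) for item in allowlist) if n}
--     if not allowed_set:
--         return False
--     h = normalize_hostname(host)
--     if h in allowed_set:
--         return True
--     return any(h[i + 1:] in allowed_set for i in range(len(h)) if h[i] == '.')
-- ===== Notes on version B (the rewrite author's own statement) =====
-- stated objective: idiomatic
-- what changed: B inverts the scan: instead of testing every allowlist entry with endswith against the host, it builds a set of normalized entries once and probes it with the host's dot-boundary suffixes (host itself plus host[i+1:] for each dot), so the allowlist is never scanned per candidate.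
import Mathlib
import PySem

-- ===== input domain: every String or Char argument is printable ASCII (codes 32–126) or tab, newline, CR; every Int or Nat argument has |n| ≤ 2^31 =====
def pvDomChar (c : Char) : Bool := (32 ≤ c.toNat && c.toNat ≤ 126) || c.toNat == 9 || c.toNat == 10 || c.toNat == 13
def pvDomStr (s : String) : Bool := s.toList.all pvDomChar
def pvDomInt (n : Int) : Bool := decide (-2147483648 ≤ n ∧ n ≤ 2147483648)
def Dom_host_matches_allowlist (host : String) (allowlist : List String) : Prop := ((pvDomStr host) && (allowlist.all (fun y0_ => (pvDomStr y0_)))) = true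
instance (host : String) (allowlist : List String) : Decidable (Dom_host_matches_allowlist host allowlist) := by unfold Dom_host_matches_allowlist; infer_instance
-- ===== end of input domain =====

-- B replaces A's per-entry endswith scan by one set of normalized entries probed
-- with the host's dot-boundary suffixes (objective: idiomatic suffix lookup).

-- ===== PORT A =====
-- exact hand port: Python's str.rstrip(".") removes exactly the trailing '.' characters
def pvRstripDot (cs : List Char) : List Char :=
  (cs.reverse.dropWhile (fun c => c == '.')).reverse

-- normalize_hostname: str(host or "").strip().rstrip(".").lower() ('host or ""' is the identity on str)
def normalize_hostname (cs : List Char) : List Char :=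
  PySem.Chars.lower (pvRstripDot (PySem.Chars.strip cs))

def host_matches_allowlist (host : String) (allowlist : List String) : Bool :=
  let normalized_host := normalize_hostname host.toList
  let normalized_allowlist :=
    (allowlist.map (fun item => normalize_hostname item.toList)).filter (fun a => !a.isEmpty)
  if normalized_allowlist.isEmpty then false
  else normalized_allowlist.any (fun allowed =>
    normalized_host == allowed || PySem.Chars.endswith normalized_host ('.' :: allowed))

-- ===== PORT B =====
def host_matches_allowlist_alt (host : String) (allowlist : List String) : Bool :=
  let allowedSet : PySem.Set (List Char) :=
    PySem.Set.ofList ((allowlist.map (fun item => normalize_hostname item.toList)).filter (fun a => !a.isEmpty))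
  if allowedSet.isEmpty then false
  else
    let h := normalize_hostname host.toList
    if PySem.Set.contains allowedSet h then true
    else (List.range h.length).any (fun i =>
      (h.getD i ' ' == '.') && PySem.Set.contains allowedSet (h.drop (i + 1)))

-- ===== PRECONDITION & SPEC =====
def Spec_host_matches_allowlist (host : String) (allowlist : List String) (out : Bool) : Prop := out = host_matches_allowlist_alt host allowlist
instance (host : String) (allowlist : List String) (out : Bool) : Decidable (Spec_host_matches_allowlist host allowlist out) := by unfold Spec_host_matches_allowlist; infer_instance

-- ===== CLAIM (what is proved, stated in full; the proofs are below) =====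
def Claim_equal_host_matches_allowlist : Prop := ∀ (host : String) (allowlist : List String), Dom_host_matches_allowlist host allowlist → Spec_host_matches_allowlist host allowlist (host_matches_allowlist host allowlist)

-- ===== LEMMAS AND PROOFS =====

-- '.'-prefixed suffix ↔ a dot position whose tail is a
lemma dot_suffix_iff (a h : List Char) :
    ('.' :: a) <:+ h ↔ ∃ i, ∃ _ : i < h.length, h[i] = '.' ∧ h.drop (i + 1) = a := by
  constructor
  · rintro ⟨t, rfl⟩
    refine ⟨t.length, by simp, ?_, ?_⟩
    · simp
    · simp [List.drop_append (l₁ := t) (l₂ := '.' :: a) (i := 1)]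
  · rintro ⟨i, hi, hc, hd⟩
    refine ⟨h.take i, ?_⟩
    have h1 := List.take_append_drop i h
    rw [List.drop_eq_getElem_cons hi, hc, hd] at h1
    exact h1

lemma ofList_eq_nil_iff (S : List (List Char)) : PySem.Set.ofList S = [] ↔ S = [] := by
  constructor
  · intro he
    cases S with
    | nil => rfl
    | cons x xs =>
      have hx : x ∈ PySem.Set.ofList (x :: xs) := (PySem.Set.mem_ofList _ _).mpr (List.mem_cons_self)
      rw [he] at hx
      simp at hx
  · rintro rfl; rfl

lemma contains_ofList (S : List (List Char)) (x : List Char) :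
    (PySem.Set.ofList S).contains x = true ↔ x ∈ S := by
  rw [PySem.Set.contains_iff]
  exact PySem.Set.mem_ofList _ _

lemma any_eq (h : List Char) (S : List (List Char)) :
    (S.any (fun a => h == a || PySem.Chars.endswith h ('.' :: a)))
    = ((PySem.Set.ofList S).contains h
       || (List.range h.length).any (fun i =>
            (h.getD i ' ' == '.') && (PySem.Set.ofList S).contains (h.drop (i + 1)))) := by
  rw [Bool.eq_iff_iff]
  simp only [List.any_eq_true, List.mem_range, Bool.or_eq_true, Bool.and_eq_true, beq_iff_eq,
    PySem.Chars.endswith_iff, contains_ofList]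
  constructor
  · rintro ⟨a, ha, hc | hsuf⟩
    · exact Or.inl (hc ▸ ha)
    · obtain ⟨i, hi, hdot, hdrop⟩ := (dot_suffix_iff a h).mp hsuf
      refine Or.inr ⟨i, hi, ?_, hdrop ▸ ha⟩
      rw [List.getD_eq_getElem h ' ' hi, hdot]
  · rintro (hmem | ⟨i, hi, hdot, hmem⟩)
    · exact ⟨h, hmem, Or.inl rfl⟩
    · refine ⟨h.drop (i + 1), hmem, Or.inr ?_⟩
      refine (dot_suffix_iff _ h).mpr ⟨i, hi, ?_, rfl⟩
      rw [List.getD_eq_getElem h ' ' hi] at hdot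
      exact hdot

-- ===== VERDICT (by name: the statement is the Claim_ definition above) =====
theorem host_matches_allowlist_spec : Claim_equal_host_matches_allowlist := by
  intro host allowlist _
  unfold Spec_host_matches_allowlist host_matches_allowlist host_matches_allowlist_alt
  set h := normalize_hostname host.toList with hh
  set S := (allowlist.map (fun item => normalize_hostname item.toList)).filter (fun a => !a.isEmpty) with hSdef
  by_cases hS : S = []
  · simp [hS, PySem.Set.ofList]
  · have h1 : S.isEmpty = false := by simpa [List.isEmpty_iff] using hS
    have h2 : (PySem.Set.ofList S).isEmpty = false := by
      simpa [List.isEmpty_iff, ofList_eq_nil_iff] using hS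
    simp only [h1, h2, Bool.false_eq_true, if_false]
    rw [any_eq h S]
    rcases Bool.eq_false_or_eq_true ((PySem.Set.ofList S).contains h) with hc | hc <;> simp [hc]
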